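-- pv_equiv track=rewrite | github.com/frantisek-kyn/linux-voice-control | src/formatter.py | expand_numeric_placeholders
-- ===== SOURCE A (Python) =====
-- from itertools import product
--
-- DIGITS = [
--     "zero", "one", "two", "three", "four",
--     "five", "six", "seven", "eight", "nine"
-- ]
--
-- def expand_numeric_placeholders(strings):
--     result = []
--
--     for s in strings:
--         count = s.count("{numeric}")
--
--         # No placeholders, keep the string as-is
--         if count == 0:
--             result.append(s)
--             continue
--
--         # Generate every combination of digits for the placeholders
--         for combo in product(DIGITS, repeat=count):
--             expanded = s
--
--             # Replace placeholders one at a time in order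
--             for digit in combo:
--                 expanded = expanded.replace("{numeric}", digit, 1)
--
--             result.append(expanded)
--
--     return result
-- ===== SOURCE B (Python) =====
-- DIGITS = [
--     "zero", "one", "two", "three", "four",
--     "five", "six", "seven", "eight", "nine"
-- ]
--
-- def expand_numeric_placeholders(strings):
--     result = []
--     for s in strings:
--         count = s.count("{numeric}")
--         if count == 0:
--             result.append(s)
--             continue
--         # Incremental expansion: no product tuples; each round replaces the
--         # first remaining placeholder of every partially-expanded string.
--         current = [s]
--         for _ in range(count):
--             current = [c.replace("{numeric}", d, 1) for c in current for d in DIGITS]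
--         result.extend(current)
--     return result
-- ===== Notes on version B (the rewrite author's own statement) =====
-- stated objective: alternative
-- what changed: Replaces itertools.product over digit tuples plus an inner sequential-replace loop by an incremental fold: a working list is rebuilt count times, each round substituting every digit word for the first remaining placeholder of every partial string.
import Mathlib
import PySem

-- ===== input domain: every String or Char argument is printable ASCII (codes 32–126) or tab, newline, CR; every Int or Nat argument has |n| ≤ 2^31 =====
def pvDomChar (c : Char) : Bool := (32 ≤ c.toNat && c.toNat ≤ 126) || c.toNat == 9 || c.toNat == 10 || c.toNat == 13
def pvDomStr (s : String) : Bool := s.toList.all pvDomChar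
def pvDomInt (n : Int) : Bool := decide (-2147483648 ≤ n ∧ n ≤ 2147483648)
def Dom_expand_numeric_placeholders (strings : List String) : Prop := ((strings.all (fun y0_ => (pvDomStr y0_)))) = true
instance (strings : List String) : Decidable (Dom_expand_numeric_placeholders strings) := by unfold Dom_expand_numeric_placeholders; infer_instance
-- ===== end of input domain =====

-- B replaces itertools.product tuples + an inner replace loop by an incremental
-- per-round expansion of a working list (objective: alternative decomposition).

-- shared primitive: Python's s.replace(old, new, 1) for old ≠ "" — exact:
-- first occurrence (leftmost index) replaced, string unchanged when old is absent
def pvReplace1 (s old new : String) : String :=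
  let cs := s.toList
  let i := PySem.Chars.find cs old.toList
  if i < 0 then s
  else String.ofList (cs.take i.toNat ++ new.toList ++ cs.drop (i.toNat + old.toList.length))

def pvDIGITS : List String :=
  ["zero", "one", "two", "three", "four",
   "five", "six", "seven", "eight", "nine"]

-- ===== PORT A =====
-- itertools.product(DIGITS, repeat=n): first coordinate varies slowest
def pvCombos : Nat → List (List String)
  | 0 => [[]]
  | n + 1 => pvDIGITS.flatMap (fun d => (pvCombos n).map (fun c => d :: c))

def expand_numeric_placeholders (strings : List String) : List String :=
  strings.foldl (fun result s =>
    let count := PySem.Str.count s "{numeric}"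
    if count = 0 then result ++ [s]
    else (pvCombos count).foldl (fun r combo =>
      r ++ [combo.foldl (fun expanded digit => pvReplace1 expanded "{numeric}" digit) s]) result) []

-- ===== PORT B =====
def pvRound (cur : List String) : List String :=
  cur.flatMap (fun c => pvDIGITS.map (fun d => pvReplace1 c "{numeric}" d))

def pvRounds : Nat → List String → List String
  | 0, cur => cur
  | n + 1, cur => pvRounds n (pvRound cur)

def expand_numeric_placeholders_alt (strings : List String) : List String :=
  strings.foldl (fun result s =>
    let count := PySem.Str.count s "{numeric}"
    if count = 0 then result ++ [s]
    else result ++ pvRounds count [s]) []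

-- ===== PRECONDITION & SPEC =====
def Spec_expand_numeric_placeholders (strings : List String) (out : List String) : Prop := out = expand_numeric_placeholders_alt strings
instance (strings : List String) (out : List String) : Decidable (Spec_expand_numeric_placeholders strings out) := by unfold Spec_expand_numeric_placeholders; infer_instance

-- ===== CLAIM (what is proved, stated in full; the proofs are below) =====
def Claim_equal_expand_numeric_placeholders : Prop := ∀ (strings : List String), Dom_expand_numeric_placeholders strings → Spec_expand_numeric_placeholders strings (expand_numeric_placeholders strings)

-- ===== LEMMAS AND PROOFS =====

theorem pvRound_append (a b : List String) : pvRound (a ++ b) = pvRound a ++ pvRound b := by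
  simp [pvRound]

theorem pvRounds_append (n : Nat) (a b : List String) :
    pvRounds n (a ++ b) = pvRounds n a ++ pvRounds n b := by
  induction n generalizing a b with
  | zero => rfl
  | succ n ih => simp [pvRounds, pvRound_append, ih]

theorem pvRounds_nil (n : Nat) : pvRounds n [] = [] := by
  induction n with
  | zero => rfl
  | succ n ih => simpa [pvRounds, pvRound] using ih

theorem pvRounds_flatMap (n : Nat) (l : List String) (f : String → String) :
    pvRounds n (l.map f) = l.flatMap (fun x => pvRounds n [f x]) := by
  induction l with
  | nil => simp [pvRounds_nil]
  | cons x xs ih =>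
    have : (x :: xs).map f = [f x] ++ xs.map f := by simp
    rw [this, pvRounds_append, ih]; simp

theorem pvCombos_eq_rounds (n : Nat) (s : String) :
    (pvCombos n).map (fun c => c.foldl (fun e d => pvReplace1 e "{numeric}" d) s)
      = pvRounds n [s] := by
  induction n generalizing s with
  | zero => rfl
  | succ n ih =>
    have hR : pvRounds (n + 1) [s]
        = pvDIGITS.flatMap (fun d => pvRounds n [pvReplace1 s "{numeric}" d]) := by
      show pvRounds n (pvRound [s]) = _
      have : pvRound [s] = pvDIGITS.map (fun d => pvReplace1 s "{numeric}" d) := by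
        simp [pvRound]
      rw [this, pvRounds_flatMap]
    rw [hR]
    simp only [pvCombos, List.map_flatMap, List.map_map]
    refine List.flatMap_congr ?_
    intro d _
    have := ih (pvReplace1 s "{numeric}" d)
    simpa [Function.comp, List.foldl_cons] using this

theorem foldl_append_singleton (l : List (List String)) (acc : List String)
    (f : List String → String) :
    l.foldl (fun r c => r ++ [f c]) acc = acc ++ l.map f := by
  induction l generalizing acc with
  | nil => simp
  | cons x xs ih => simp [List.foldl_cons, ih]

theorem pv_fold_eq (strings : List String) (acc : List String) :
    strings.foldl (fun result s =>
      let count := PySem.Str.count s "{numeric}"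
      if count = 0 then result ++ [s]
      else (pvCombos count).foldl (fun r combo =>
        r ++ [combo.foldl (fun e d => pvReplace1 e "{numeric}" d) s]) result) acc
    = strings.foldl (fun result s =>
      let count := PySem.Str.count s "{numeric}"
      if count = 0 then result ++ [s]
      else result ++ pvRounds count [s]) acc := by
  have hstep : (fun (result : List String) (s : String) =>
      let count := PySem.Str.count s "{numeric}"
      if count = 0 then result ++ [s]
      else (pvCombos count).foldl (fun r combo =>
        r ++ [combo.foldl (fun e d => pvReplace1 e "{numeric}" d) s]) result)
    = (fun (result : List String) (s : String) =>
      let count := PySem.Str.count s "{numeric}"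
      if count = 0 then result ++ [s]
      else result ++ pvRounds count [s]) := by
    funext result s
    by_cases h : PySem.Str.count s "{numeric}" = 0
    · rw [if_pos h, if_pos h]
    · simp only [if_neg h]
      rw [foldl_append_singleton, pvCombos_eq_rounds]
  rw [hstep]

-- ===== VERDICT (by name: the statement is the Claim_ definition above) =====
theorem expand_numeric_placeholders_spec : Claim_equal_expand_numeric_placeholders := by
  intro strings _
  unfold Spec_expand_numeric_placeholders expand_numeric_placeholders expand_numeric_placeholders_alt
  exact pv_fold_eq strings []
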